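-- pv_equiv track=rewrite | github.com/jnanasahana/Nutriscan_ai | app.py | process_ingredients
-- ===== SOURCE A (Python) =====
-- def process_ingredients(ingrdts, fdAdtv, chkCat, catldt):
--     """Returns unique additive names found in ingrdts and a dict of categories found.
--     ingrdts: iterable of ingredient strings
--     fdAdtv: dict mapping additive identifier -> additive name/value
--     chkCat: dict mapping category -> bool (whether to check)
--     catldt: dict mapping category -> iterable of strings that belong to that category
--     """
--     results = []
--     seen = set()
--     hasCategory = {k: False for k in chkCat}
--
--     for ing in ingrdts:
--         normalized = ing.strip()
--         # check additives dict by exact match or lowercased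
--         for key, value in fdAdtv.items():
--             if normalized == key or normalized.lower() == key.lower():
--                 if value not in seen:
--                     seen.add(value)
--                     results.append(value)
--         # check categories
--         for k, check in chkCat.items():
--             if check:
--                 for p in catldt.get(k, []):
--                     if normalized == p or normalized.lower() == str(p).lower():
--                         hasCategory[k] = True
--                         break
--
--     return results, hasCategory
-- ===== SOURCE B (Python) =====
-- def process_ingredients(ingrdts, fdAdtv, chkCat, catldt):
--     # Index additives once by lowercased key, so the per-ingredient scan of
--     # fdAdtv becomes a single dict lookup (values kept in fdAdtv order).
--     by_lower = {}
--     for key, value in fdAdtv.items():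
--         by_lower.setdefault(key.lower(), []).append(value)
--
--     results = []
--     seen = set()
--     for ing in ingrdts:
--         for value in by_lower.get(ing.strip().lower(), []):
--             if value not in seen:
--                 seen.add(value)
--                 results.append(value)
--
--     # Categories: one set of normalized ingredients, then a per-category
--     # disjointness test instead of the ingredient-outer inner scan.
--     lowered = {ing.strip().lower() for ing in ingrdts}
--     hasCategory = {
--         k: check and not lowered.isdisjoint(str(p).lower() for p in catldt.get(k, []))
--         for k, check in chkCat.items()
--     }
--     return results, hasCategory
-- ===== Notes on version B (the rewrite author's own statement) =====
-- stated objective: faster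
-- what changed: B indexes the additives once in a dict keyed by lowercased name (replacing A's per-ingredient scan of fdAdtv by one lookup) and decides each category by a single set-disjointness test between the set of normalized ingredients and the category's lowercased word list, instead of A's ingredient-outer inner scans; Pre_ only excludes association lists with duplicate keys, which no Python dict argument can represent.
import Mathlib
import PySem

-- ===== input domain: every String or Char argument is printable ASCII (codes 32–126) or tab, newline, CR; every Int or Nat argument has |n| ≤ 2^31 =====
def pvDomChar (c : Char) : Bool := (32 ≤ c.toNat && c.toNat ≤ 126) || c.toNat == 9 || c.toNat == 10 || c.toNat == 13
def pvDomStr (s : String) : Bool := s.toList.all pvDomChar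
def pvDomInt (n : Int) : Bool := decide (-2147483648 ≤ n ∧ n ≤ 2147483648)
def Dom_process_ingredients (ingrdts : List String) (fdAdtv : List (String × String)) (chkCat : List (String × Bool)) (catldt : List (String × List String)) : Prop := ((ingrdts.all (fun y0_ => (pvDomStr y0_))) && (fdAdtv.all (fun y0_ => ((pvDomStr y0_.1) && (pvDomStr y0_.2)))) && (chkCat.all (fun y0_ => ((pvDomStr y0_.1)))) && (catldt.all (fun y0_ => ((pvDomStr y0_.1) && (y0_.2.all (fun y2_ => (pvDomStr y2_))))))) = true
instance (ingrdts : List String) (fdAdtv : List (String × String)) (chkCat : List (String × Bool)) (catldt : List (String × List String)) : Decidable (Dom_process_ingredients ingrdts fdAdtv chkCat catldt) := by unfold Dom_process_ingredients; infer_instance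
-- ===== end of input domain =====

-- B indexes the additives once by lowercased key and decides each category by one set-disjointness
-- test, replacing A's per-ingredient inner scans (objective: faster).

-- ===== PORT A =====
-- inner additive loop of A: for key, value in fdAdtv.items(): …
def pvAddStepA (fdAdtv : List (String × String)) (p : List String × PySem.Set String) (ing : String) : List String × PySem.Set String :=
  let normalized := PySem.Str.strip ing
  fdAdtv.foldl (fun p kv =>
    if normalized == kv.1 || PySem.Str.lower normalized == PySem.Str.lower kv.1 then
      (if PySem.Set.contains p.2 kv.2 then p else (p.1 ++ [kv.2], PySem.Set.add p.2 kv.2))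
    else p) p

-- inner category loop of A: for k, check in chkCat.items(): … (the for/break over catldt.get(k, []) is .any)
def pvCatStepA (chkCat : List (String × Bool)) (catldt : List (String × List String)) (h : PySem.Dict String Bool) (ing : String) : PySem.Dict String Bool :=
  let normalized := PySem.Str.strip ing
  chkCat.foldl (fun h kc =>
    if kc.2 then
      (if ((PySem.Dict.mk catldt).getD kc.1 []).any
            (fun p => normalized == p || PySem.Str.lower normalized == PySem.Str.lower p)
       then h.insert kc.1 true else h)
    else h) h

def process_ingredients (ingrdts : List String) (fdAdtv : List (String × String)) (chkCat : List (String × Bool)) (catldt : List (String × List String)) : List String × (List (String × Bool)) :=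
  let hc0 : PySem.Dict String Bool := PySem.Dict.ofList (chkCat.map (fun kc => (kc.1, false)))
  let fin := ingrdts.foldl (fun st ing =>
      let rs := pvAddStepA fdAdtv (st.1, st.2.1) ing
      (rs.1, rs.2, pvCatStepA chkCat catldt st.2.2 ing))
    ([], PySem.Set.empty, hc0)
  (fin.1, fin.2.2.items)

-- ===== PORT B =====
def process_ingredients_alt (ingrdts : List String) (fdAdtv : List (String × String)) (chkCat : List (String × Bool)) (catldt : List (String × List String)) : List String × (List (String × Bool)) :=
  let byLower := fdAdtv.foldl (fun d kv => d.modify (PySem.Str.lower kv.1) [] (· ++ [kv.2])) PySem.Dict.empty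
  let res := ingrdts.foldl (fun p ing =>
      (byLower.getD (PySem.Str.lower (PySem.Str.strip ing)) []).foldl
        (fun q v => if PySem.Set.contains q.2 v then q else (q.1 ++ [v], PySem.Set.add q.2 v)) p)
    ([], PySem.Set.empty)
  let lowered : PySem.Set String := PySem.Set.ofList (ingrdts.map (fun ing => PySem.Str.lower (PySem.Str.strip ing)))
  (res.1, chkCat.map (fun kc =>
    (kc.1, kc.2 && !(PySem.Set.isdisjoint lowered
      (((PySem.Dict.mk catldt).getD kc.1 []).map (fun p => PySem.Str.lower p))))))

-- ===== PRECONDITION & SPEC =====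
-- Pre_ only excludes association lists whose dict-typed arguments carry a duplicated key: a Python
-- dict cannot contain a key twice, so such lists represent no input the Python function receives.
def Pre_process_ingredients (ingrdts : List String) (fdAdtv : List (String × String)) (chkCat : List (String × Bool)) (catldt : List (String × List String)) : Prop :=
  (fdAdtv.map Prod.fst).Nodup ∧ (chkCat.map Prod.fst).Nodup ∧ (catldt.map Prod.fst).Nodup
instance (ingrdts : List String) (fdAdtv : List (String × String)) (chkCat : List (String × Bool)) (catldt : List (String × List String)) : Decidable (Pre_process_ingredients ingrdts fdAdtv chkCat catldt) := by unfold Pre_process_ingredients; infer_instance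

def pvWitness_process_ingredients : List String × (List (String × String)) × (List (String × Bool)) × (List (String × List String)) :=
  ([" e330 ", "salt"], [("E330", "Citric acid")], [("acid", true), ("sweetener", false)], [("acid", ["citric acid", "e330"])])

def Spec_process_ingredients (ingrdts : List String) (fdAdtv : List (String × String)) (chkCat : List (String × Bool)) (catldt : List (String × List String)) (out : List String × (List (String × Bool))) : Prop := out = process_ingredients_alt ingrdts fdAdtv chkCat catldt
instance (ingrdts : List String) (fdAdtv : List (String × String)) (chkCat : List (String × Bool)) (catldt : List (String × List String)) (out : List String × (List (String × Bool))) : Decidable (Spec_process_ingredients ingrdts fdAdtv chkCat catldt out) := by unfold Spec_process_ingredients; infer_instance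

-- ===== CLAIM (what is proved, stated in full; the proofs are below) =====
def Claim_equal_process_ingredients : Prop := ∀ (ingrdts : List String) (fdAdtv : List (String × String)) (chkCat : List (String × Bool)) (catldt : List (String × List String)), Dom_process_ingredients ingrdts fdAdtv chkCat catldt → Pre_process_ingredients ingrdts fdAdtv chkCat catldt → Spec_process_ingredients ingrdts fdAdtv chkCat catldt (process_ingredients ingrdts fdAdtv chkCat catldt)

-- ===== LEMMAS AND PROOFS =====

-- the two match tests of A collapse: string equality implies lowercase equality
theorem pv_cond_eq (a b : String) :
    (a == b || PySem.Str.lower a == PySem.Str.lower b) = (PySem.Str.lower a == PySem.Str.lower b) := by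
  by_cases h : a = b
  · simp [h]
  · simp [h]

-- normalized, lowercased form of an ingredient
def pvNrm (ing : String) : String := PySem.Str.lower (PySem.Str.strip ing)

-- one dedup-append step of the shared results/'seen' accumulator
def pvDStep (q : List String × PySem.Set String) (v : String) : List String × PySem.Set String :=
  if PySem.Set.contains q.2 v then q else (q.1 ++ [v], PySem.Set.add q.2 v)

-- does ingredient ing put category k in (A's raw inner test)?
def pvQ (catldt : List (String × List String)) (ing k : String) : Bool :=
  ((PySem.Dict.mk catldt).getD k []).any
    (fun p => PySem.Str.strip ing == p || PySem.Str.lower (PySem.Str.strip ing) == PySem.Str.lower p)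

-- one step of A's category pass, with the per-ingredient test abstracted as q
def pvUpd (q : String → Bool) (h : PySem.Dict String Bool) (kc : String × Bool) : PySem.Dict String Bool :=
  if kc.2 then (if q kc.1 then h.insert kc.1 true else h) else h

theorem pv_catstep_eq (chkCat : List (String × Bool)) (catldt : List (String × List String)) (h : PySem.Dict String Bool) (ing : String) :
    pvCatStepA chkCat catldt h ing = chkCat.foldl (pvUpd (pvQ catldt ing)) h := rfl

-- a fold that applies g ∘ f under a boolean filter is the fold of the filtered, mapped list
theorem pv_foldl_if_filter_map {α β σ : Type} (c : α → Bool) (f : α → β) (g : σ → β → σ) :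
    ∀ (l : List α) (s : σ),
      l.foldl (fun s x => if c x then g s (f x) else s) s = ((l.filter c).map f).foldl g s := by
  intro l
  induction l with
  | nil => intro s; rfl
  | cons x xs ih =>
    intro s
    by_cases hx : c x = true <;> simp [hx, ih]

theorem pv_filter_flip (l : List (String × String)) (x : String) :
    l.filter (fun kv => x == PySem.Str.lower kv.1) = l.filter (fun kv => PySem.Str.lower kv.1 == x) := by
  apply List.filter_congr
  intro kv _
  by_cases h : x = PySem.Str.lower kv.1
  · simp [h]
  · simp [h, Ne.symm h]

-- A's per-ingredient additive scan is the dedup fold of the values whose lowercased key matches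
theorem pv_addA_eq (fdAdtv : List (String × String)) (ing : String) (p : List String × PySem.Set String) :
    pvAddStepA fdAdtv p ing
      = ((fdAdtv.filter (fun kv => PySem.Str.lower kv.1 == pvNrm ing)).map Prod.snd).foldl pvDStep p := by
  unfold pvAddStepA
  simp only [pv_cond_eq]
  have h := pv_foldl_if_filter_map
      (fun kv : String × String => PySem.Str.lower (PySem.Str.strip ing) == PySem.Str.lower kv.1)
      Prod.snd pvDStep fdAdtv p
  rw [pv_filter_flip] at h
  exact h

-- keyed variant of PySem.Dict.getD_foldl_modify_append (that lemma modifies at p.1, here at lower p.1)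
theorem pv_byLower_getD_aux :
    ∀ (l : List (String × String)) (d : PySem.Dict String (List String)) (x : String),
      (l.foldl (fun d kv => d.modify (PySem.Str.lower kv.1) [] (· ++ [kv.2])) d).getD x []
        = d.getD x [] ++ (l.filter (fun kv => PySem.Str.lower kv.1 == x)).map Prod.snd := by
  intro l
  induction l with
  | nil => intro d x; simp
  | cons kv t ih =>
    intro d x
    simp only [List.foldl_cons, List.filter_cons]
    by_cases h : PySem.Str.lower kv.1 = x
    · rw [ih]
      rw [PySem.Dict.getD_modify]
      simp [h, List.append_assoc]
    · rw [ih]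
      rw [PySem.Dict.getD_modify]
      simp [h, Ne.symm h]

theorem pv_byLower_getD (fdAdtv : List (String × String)) (x : String) :
    (fdAdtv.foldl (fun d kv => d.modify (PySem.Str.lower kv.1) [] (· ++ [kv.2])) PySem.Dict.empty).getD x []
      = (fdAdtv.filter (fun kv => PySem.Str.lower kv.1 == x)).map Prod.snd := by
  rw [pv_byLower_getD_aux]
  simp [PySem.Dict.getD_empty]

-- the triple fold of A splits into the additive pair fold and the category dict fold
theorem pv_split (fdAdtv : List (String × String)) (chkCat : List (String × Bool)) (catldt : List (String × List String)) :
    ∀ (ings : List String) (r : List String) (s : PySem.Set String) (h : PySem.Dict String Bool),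
      ings.foldl (fun st ing =>
          let rs := pvAddStepA fdAdtv (st.1, st.2.1) ing
          (rs.1, rs.2, pvCatStepA chkCat catldt st.2.2 ing)) (r, s, h)
        = ((ings.foldl (pvAddStepA fdAdtv) (r, s)).1,
           (ings.foldl (pvAddStepA fdAdtv) (r, s)).2,
           ings.foldl (pvCatStepA chkCat catldt) h) := by
  intro ings
  induction ings with
  | nil => intro r s h; rfl
  | cons ing t ih =>
    intro r s h
    simp only [List.foldl_cons]
    rw [ih]

theorem pv_updfold_getD_notmem (q : String → Bool) :
    ∀ (l : List (String × Bool)) (h : PySem.Dict String Bool) (k : String), k ∉ l.map Prod.fst →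
      (l.foldl (pvUpd q) h).getD k false = h.getD k false := by
  intro l
  induction l with
  | nil => intro h k _; rfl
  | cons kc t ih =>
    intro h k hk
    simp only [List.map_cons, List.mem_cons, not_or] at hk
    obtain ⟨hne, hk'⟩ := hk
    simp only [List.foldl_cons]
    rw [ih _ k hk']
    unfold pvUpd
    split_ifs
    · rw [PySem.Dict.getD_insert]; simp [hne]
    · rfl
    · rfl

theorem pv_updfold_getD_mem (q : String → Bool) :
    ∀ (l : List (String × Bool)), (l.map Prod.fst).Nodup → ∀ (k : String) (c : Bool), (k, c) ∈ l →
      ∀ (h : PySem.Dict String Bool),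
      (l.foldl (pvUpd q) h).getD k false = (h.getD k false || (c && q k)) := by
  intro l
  induction l with
  | nil => intro _ k c hmem; cases hmem
  | cons kc t ih =>
    intro hnd k c hmem h
    obtain ⟨k1, c1⟩ := kc
    simp only [List.map_cons, List.nodup_cons] at hnd
    obtain ⟨hnotin, hndt⟩ := hnd
    simp only [List.foldl_cons]
    rcases List.mem_cons.mp hmem with heq | htail
    · injection heq with hk hc
      subst hk; subst hc
      have hknot : k ∉ t.map Prod.fst := hnotin
      rw [pv_updfold_getD_notmem q t _ k hknot]
      show (if c = true then (if q k = true then h.insert k true else h) else h).getD k false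
            = (h.getD k false || (c && q k))
      split_ifs with h1 h2
      · simp [h1, h2]
      · simp [h1, h2]
      · simp [h1]
    · have hkne : k ≠ k1 := by
        intro hkk
        exact hnotin (hkk ▸ List.mem_map.mpr ⟨(k, c), htail, rfl⟩)
      rw [ih hndt k c htail]
      show ((if c1 = true then (if q k1 = true then h.insert k1 true else h) else h).getD k false
              || (c && q k))
            = (h.getD k false || (c && q k))
      split_ifs <;> simp [PySem.Dict.getD_insert, hkne]

theorem pv_updfold_keys (q : String → Bool) :
    ∀ (l : List (String × Bool)) (h : PySem.Dict String Bool), (∀ kc ∈ l, h.contains kc.1 = true) →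
      (l.foldl (pvUpd q) h).keys = h.keys := by
  intro l
  induction l with
  | nil => intro h _; rfl
  | cons kc t ih =>
    intro h hcon
    simp only [List.foldl_cons]
    have h1 : (pvUpd q h kc).keys = h.keys := by
      unfold pvUpd
      split_ifs
      · apply PySem.Dict.keys_insert_of_contains
        exact hcon kc (by simp)
      · rfl
      · rfl
    rw [ih (pvUpd q h kc) ?_, h1]
    intro kc' hkc'
    have hc' := hcon kc' (List.mem_cons_of_mem _ hkc')
    unfold pvUpd
    split_ifs
    · rw [PySem.Dict.contains_insert]; simp [hc']
    · exact hc'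
    · exact hc'

theorem pv_catfold_getD (chkCat : List (String × Bool)) (catldt : List (String × List String))
    (hnd : (chkCat.map Prod.fst).Nodup) (k : String) (c : Bool) (hmem : (k, c) ∈ chkCat) :
    ∀ (ings : List String) (h : PySem.Dict String Bool),
      (ings.foldl (pvCatStepA chkCat catldt) h).getD k false
        = (h.getD k false || (c && ings.any (fun ing => pvQ catldt ing k))) := by
  intro ings
  induction ings with
  | nil => intro h; simp
  | cons ing t ih =>
    intro h
    simp only [List.foldl_cons]
    rw [ih, pv_catstep_eq, pv_updfold_getD_mem (pvQ catldt ing) chkCat hnd k c hmem h]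
    simp [Bool.and_or_distrib_left, Bool.or_assoc]

theorem pv_catfold_keys (chkCat : List (String × Bool)) (catldt : List (String × List String)) :
    ∀ (ings : List String) (h : PySem.Dict String Bool), (∀ kc ∈ chkCat, h.contains kc.1 = true) →
      (ings.foldl (pvCatStepA chkCat catldt) h).keys = h.keys := by
  intro ings
  induction ings with
  | nil => intro h _; rfl
  | cons ing t ih =>
    intro h hcon
    simp only [List.foldl_cons]
    have h1 : (pvCatStepA chkCat catldt h ing).keys = h.keys := by
      rw [pv_catstep_eq]; exact pv_updfold_keys _ chkCat h hcon
    rw [ih _ ?_, h1]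
    intro kc hkc
    rw [PySem.Dict.contains_iff_mem_keys, h1, ← PySem.Dict.contains_iff_mem_keys]
    exact hcon kc hkc

-- hc0 = {k: False for k in chkCat}
theorem pv_hc0_keys (chkCat : List (String × Bool)) (hnd : (chkCat.map Prod.fst).Nodup) :
    (PySem.Dict.ofList (chkCat.map (fun kc => (kc.1, false)))).keys = chkCat.map Prod.fst := by
  have h1 : PySem.Dict.ofList (chkCat.map (fun kc => (kc.1, false)))
      = (chkCat.map (fun kc => (kc.1, false))).foldl (fun d p => d.insert p.1 p.2) PySem.Dict.empty := rfl
  rw [h1, PySem.Dict.keys_foldl_insert_key, PySem.Dict.keys_empty, PySem.Set.update_nil_left,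
      List.map_map]
  exact PySem.Set.ofList_eq_self_of_nodup _ hnd

theorem pv_insert_false_fold :
    ∀ (l : List (String × Bool)) (d : PySem.Dict String Bool), (∀ k, d.getD k false = false) →
      ∀ (k : String), ((l.map (fun kc => (kc.1, false))).foldl (fun d p => d.insert p.1 p.2) d).getD k false = false := by
  intro l
  induction l with
  | nil => intro d hd k; exact hd k
  | cons kc t ih =>
    intro d hd k
    simp only [List.map_cons, List.foldl_cons]
    refine ih (d.insert kc.1 false) (fun k' => ?_) k
    rw [PySem.Dict.getD_insert]
    split
    · rfl
    · exact hd k'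

theorem pv_hc0_getD (chkCat : List (String × Bool)) (k : String) :
    (PySem.Dict.ofList (chkCat.map (fun kc => (kc.1, false)))).getD k false = false := by
  exact pv_insert_false_fold chkCat PySem.Dict.empty (fun _ => by simp [PySem.Dict.getD_empty]) k

-- B's per-category disjointness test equals "some ingredient matches a word of the category"
theorem pv_not_disjoint (ingrdts ps : List String) :
    (!(PySem.Set.isdisjoint (PySem.Set.ofList (ingrdts.map (fun ing => PySem.Str.lower (PySem.Str.strip ing))))
        (ps.map (fun p => PySem.Str.lower p))))
      = ingrdts.any (fun ing => ps.any
          (fun p => PySem.Str.strip ing == p || PySem.Str.lower (PySem.Str.strip ing) == PySem.Str.lower p)) := by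
  simp only [pv_cond_eq]
  cases hdis : PySem.Set.isdisjoint (PySem.Set.ofList (ingrdts.map (fun ing => PySem.Str.lower (PySem.Str.strip ing)))) (ps.map (fun p => PySem.Str.lower p)) with
  | false =>
    simp only [Bool.not_false]
    symm
    rw [List.any_eq_true]
    by_contra hno
    push_neg at hno
    have hall : ∀ x ∈ PySem.Set.ofList (ingrdts.map (fun ing => PySem.Str.lower (PySem.Str.strip ing))),
        x ∉ ps.map (fun p => PySem.Str.lower p) := by
      intro x hx hxt
      rw [PySem.Set.mem_ofList] at hx
      obtain ⟨ing, hing, hx⟩ := List.mem_map.mp hx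
      obtain ⟨p, hp, hpt⟩ := List.mem_map.mp hxt
      exact hno ing hing (List.any_eq_true.mpr ⟨p, hp, by rw [beq_iff_eq, hx, hpt]⟩)
    rw [(PySem.Set.isdisjoint_iff _ _).mpr hall] at hdis
    cases hdis
  | true =>
    simp only [Bool.not_true]
    symm
    rw [List.any_eq_false]
    intro ing hing
    rw [Bool.not_eq_true, List.any_eq_false]
    intro p hp hbeq
    rw [beq_iff_eq] at hbeq
    exact (PySem.Set.isdisjoint_iff _ _).mp hdis
      (PySem.Str.lower (PySem.Str.strip ing))
      ((PySem.Set.mem_ofList _ _).mpr (List.mem_map.mpr ⟨ing, hing, rfl⟩))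
      (List.mem_map.mpr ⟨p, hp, hbeq.symm⟩)

-- ===== VERDICT (by name: the statement is the Claim_ definition above) =====
theorem process_ingredients_spec : Claim_equal_process_ingredients := by
  intro ingrdts fdAdtv chkCat catldt hdom hpre
  obtain ⟨hfd, hck, hct⟩ := hpre
  unfold Spec_process_ingredients
  simp only [process_ingredients, process_ingredients_alt]
  rw [pv_split]
  refine Prod.ext_iff.mpr ⟨?_, ?_⟩
  · -- results component
    have hfun : pvAddStepA fdAdtv
        = (fun (p : List String × PySem.Set String) (ing : String) =>
            ((fdAdtv.foldl (fun d kv => d.modify (PySem.Str.lower kv.1) [] (· ++ [kv.2])) PySem.Dict.empty).getD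
                (PySem.Str.lower (PySem.Str.strip ing)) []).foldl
              (fun q v => if PySem.Set.contains q.2 v then q else (q.1 ++ [v], PySem.Set.add q.2 v)) p) := by
      funext p ing
      rw [pv_addA_eq, ← pv_byLower_getD fdAdtv (pvNrm ing)]
      rfl
    rw [hfun]
  · -- category component
    have hcon : ∀ kc ∈ chkCat,
        (PySem.Dict.ofList (chkCat.map (fun kc => (kc.1, false)))).contains kc.1 = true := by
      intro kc hkc
      rw [PySem.Dict.contains_iff_mem_keys, pv_hc0_keys chkCat hck]
      exact List.mem_map.mpr ⟨kc, hkc, rfl⟩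
    have hkeys : (ingrdts.foldl (pvCatStepA chkCat catldt)
        (PySem.Dict.ofList (chkCat.map (fun kc => (kc.1, false))))).keys = chkCat.map Prod.fst := by
      rw [pv_catfold_keys chkCat catldt ingrdts _ hcon, pv_hc0_keys chkCat hck]
    have hnodup : (ingrdts.foldl (pvCatStepA chkCat catldt)
        (PySem.Dict.ofList (chkCat.map (fun kc => (kc.1, false))))).keys.Nodup := by
      rw [hkeys]; exact hck
    rw [PySem.Dict.items_eq_map_keys _ hnodup false, hkeys, List.map_map]
    refine List.map_congr_left ?_
    intro kc hkc
    simp only [Function.comp]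
    have hmem : (kc.1, kc.2) ∈ chkCat := by simpa using hkc
    rw [pv_catfold_getD chkCat catldt hck kc.1 kc.2 hmem ingrdts _, pv_hc0_getD]
    rw [pv_not_disjoint ingrdts ((PySem.Dict.mk catldt).getD kc.1 [])]
    simp [pvQ]
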